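-- pv_equiv track=rewrite | github.com/KalbinVV/Project-Arduino | Crypt.py | rsa_get_open_key
-- ===== SOURCE A (Python) =====
-- from math import isqrt, gcd
--
-- def is_prime(n: int) -> bool:
--     for i in range(2, isqrt(n) + 1):
--         if n % i == 0:
--             return False
--
--     return True
--
-- def rsa_get_open_key(euler: int) -> int:
--     a = 0
--     b = 0
--
--     for i in range(2, euler):
--         if is_prime(i):
--             if gcd(i, euler) == 1:
--                 return i
--
--     return 0
-- ===== SOURCE B (Python) =====
-- def rsa_get_open_key(euler: int) -> int:
--     # Incremental trial division by the primes collected so far; a prime i is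
--     # the answer as soon as it does not divide euler.
--     primes = []
--     i = 2
--     while i < euler:
--         if all(i % p for p in primes if p * p <= i):
--             primes.append(i)
--             if euler % i != 0:
--                 return i
--         i += 1
--     return 0
-- ===== Notes on version B (the rewrite author's own statement) =====
-- stated objective: alternative
-- what changed: B replaces per-candidate trial division over all integers up to isqrt(i) plus a gcd test by an incremental sieve: it maintains the list of primes found so far, tests each candidate only against those primes up to sqrt(i), and returns the first prime with euler % i != 0 instead of gcd(i, euler) == 1.
import Mathlib
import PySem

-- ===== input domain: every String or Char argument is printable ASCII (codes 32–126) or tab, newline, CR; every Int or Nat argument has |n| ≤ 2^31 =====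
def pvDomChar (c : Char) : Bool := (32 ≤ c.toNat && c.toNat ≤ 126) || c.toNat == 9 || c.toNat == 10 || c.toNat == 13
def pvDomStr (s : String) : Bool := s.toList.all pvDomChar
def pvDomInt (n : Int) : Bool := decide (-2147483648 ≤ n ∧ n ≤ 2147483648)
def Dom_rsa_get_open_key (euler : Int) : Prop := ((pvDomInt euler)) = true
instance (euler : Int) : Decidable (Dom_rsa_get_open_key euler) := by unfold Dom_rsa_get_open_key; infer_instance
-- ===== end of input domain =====

-- B collects the primes found so far, tests each candidate only against those primes
-- (up to √i), and replaces gcd(i, euler) == 1 by euler % i != 0 (valid: i is prime);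
-- objective: alternative.

-- ===== PORT A =====
-- is_prime(n): trial division over range(2, isqrt(n)+1); the early 'return False'
-- loop is List.all (exact: is_prime is only called with n ≥ 2, where isqrt = Int.sqrt)
def isPrimeA (n : Int) : Bool :=
  (PySem.List.pyRange 2 (Int.sqrt n + 1) 1).all (fun d => PySem.Int.mod n d != 0)

-- the 'for i in range(2, euler)' loop with its early return (a = b = 0 are unused in A)
def rsaLoopA (euler i : Int) : Int :=
  if i < euler then
    if isPrimeA i then
      if Int.gcd i euler == 1 then i else rsaLoopA euler (i + 1)
    else rsaLoopA euler (i + 1)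
  else 0
termination_by (euler - i).toNat
decreasing_by all_goals omega

def rsa_get_open_key (euler : Int) : Int := rsaLoopA euler 2

-- ===== PORT B =====
-- B's while loop: state = (primes collected so far, candidate i);
-- 'all(i % p for p in primes if p * p <= i)' is List.all with the filter as '!(p*p ≤ i) ||'
def rsaLoopB (euler : Int) (primes : List Int) (i : Int) : Int :=
  if i < euler then
    if primes.all (fun p => !(decide (p * p ≤ i)) || (PySem.Int.mod i p != 0)) then
      if PySem.Int.mod euler i != 0 then i
      else rsaLoopB euler (primes ++ [i]) (i + 1)
    else rsaLoopB euler primes (i + 1)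
  else 0
termination_by (euler - i).toNat
decreasing_by all_goals omega

def rsa_get_open_key_alt (euler : Int) : Int := rsaLoopB euler [] 2

-- ===== PRECONDITION & SPEC =====
def Spec_rsa_get_open_key (euler : Int) (out : Int) : Prop := out = rsa_get_open_key_alt euler
instance (euler : Int) (out : Int) : Decidable (Spec_rsa_get_open_key euler out) := by unfold Spec_rsa_get_open_key; infer_instance

-- ===== CLAIM (what is proved, stated in full; the proofs are below) =====
def Claim_equal_rsa_get_open_key : Prop := ∀ (euler : Int), Dom_rsa_get_open_key euler → Spec_rsa_get_open_key euler (rsa_get_open_key euler)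

-- ===== LEMMAS AND PROOFS =====

-- A's trial-division test decides primality of i.toNat (for 2 ≤ i).
theorem isPrimeA_iff (i : Int) (hi : 2 ≤ i) : isPrimeA i = true ↔ Nat.Prime i.toNat := by
  rw [Nat.prime_def_le_sqrt]
  simp only [isPrimeA, List.all_eq_true, PySem.List.mem_pyRange_one, bne_iff_ne, ne_eq,
    PySem.Int.mod_eq_zero_iff_dvd]
  constructor
  · intro h
    refine ⟨by omega, fun m h2 hms hdvd => ?_⟩
    have hd : (m : Int) ∣ i := by
      have := Int.natCast_dvd_natCast.mpr hdvd
      rwa [Int.toNat_of_nonneg (by omega)] at this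
    refine h (m : Int) ⟨by exact_mod_cast h2, ?_⟩ hd
    have : (m : Int) ≤ Int.sqrt i := by
      show (m : Int) ≤ (Nat.sqrt i.toNat : Int)
      exact_mod_cast hms
    omega
  · rintro ⟨-, h⟩ d ⟨hd2, hdlt⟩ hdvd
    have hd0 : 0 ≤ d := by omega
    have : d.toNat ∣ i.toNat := by
      rw [← Int.natCast_dvd_natCast, Int.toNat_of_nonneg hd0, Int.toNat_of_nonneg (by omega)]
      exact hdvd
    refine h d.toNat (by omega) ?_ this
    have : d ≤ (Nat.sqrt i.toNat : Int) := by
      have : d ≤ Int.sqrt i := by omega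
      exact this
    omega

-- B's test against the collected primes decides the same primality, under the
-- invariant that 'primes' holds exactly the primes below i.
theorem testB_iff (i : Int) (primes : List Int) (hi : 2 ≤ i)
    (hinv : ∀ p, p ∈ primes ↔ 2 ≤ p ∧ p < i ∧ Nat.Prime p.toNat) :
    (primes.all (fun p => !(decide (p * p ≤ i)) || (PySem.Int.mod i p != 0))) = true
      ↔ Nat.Prime i.toNat := by
  simp only [List.all_eq_true, Bool.or_eq_true, Bool.not_eq_true', decide_eq_false_iff_not,
    bne_iff_ne, ne_eq, PySem.Int.mod_eq_zero_iff_dvd, hinv]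
  constructor
  · intro h
    by_contra hnp
    set m := i.toNat.minFac with hm
    have hmp : m.Prime := Nat.minFac_prime (by omega)
    have hmd : m ∣ i.toNat := Nat.minFac_dvd _
    have hsq : m ^ 2 ≤ i.toNat := Nat.minFac_sq_le_self (by omega) hnp
    have hmlt : m < i.toNat := by
      rcases Nat.lt_or_ge m i.toNat with h' | h'
      · exact h'
      · exfalso; apply hnp
        have : m = i.toNat := le_antisymm (Nat.le_of_dvd (by omega) hmd) h'
        rwa [this] at hmp
    have h2m : 2 ≤ m := hmp.two_le
    have hdInt : (m : Int) ∣ i := by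
      have := Int.natCast_dvd_natCast.mpr hmd
      rwa [Int.toNat_of_nonneg (by omega)] at this
    rcases h (m : Int) ⟨by exact_mod_cast h2m, by omega, by simpa using hmp⟩ with hc | hc
    · apply hc
      have h' : (m * m : ℕ) ≤ i.toNat := by rw [← pow_two]; exact hsq
      have h'' := Int.ofNat_le.mpr h'
      push_cast at h''
      omega
    · exact hc hdInt
  · intro hp p ⟨hp2, hplt, hpp⟩
    right
    intro hdvd
    have : p.toNat ∣ i.toNat := by
      rw [← Int.natCast_dvd_natCast, Int.toNat_of_nonneg (by omega), Int.toNat_of_nonneg (by omega)]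
      exact hdvd
    rcases (hp.eq_one_or_self_of_dvd _ this) with h1 | h1
    · omega
    · omega

-- For a prime i, gcd(i, euler) = 1 iff euler % i ≠ 0.
theorem gcd_eq_mod (euler i : Int) (hi : 2 ≤ i) (hp : Nat.Prime i.toNat) :
    (Int.gcd i euler == 1) = (PySem.Int.mod euler i != 0) := by
  have h1 : Int.gcd i euler = 1 ↔ ¬ (i ∣ euler) := by
    rw [Int.gcd]
    have : i.natAbs = i.toNat := by omega
    rw [this, ← Int.natAbs_dvd_natAbs, show i.natAbs = i.toNat by omega]
    exact hp.coprime_iff_not_dvd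
  rw [← PySem.Int.mod_eq_zero_iff_dvd] at h1
  by_cases h : PySem.Int.mod euler i = 0
  · simp [h, h1]
  · simp only [h, not_false_eq_true, iff_true] at h1
    simp [h, h1]

-- The two loops agree from any state satisfying the invariant.
theorem loop_eq (n : Nat) (euler : Int) : ∀ (i : Int) (primes : List Int),
    (euler - i).toNat ≤ n → 2 ≤ i →
    (∀ p, p ∈ primes ↔ 2 ≤ p ∧ p < i ∧ Nat.Prime p.toNat) →
    rsaLoopA euler i = rsaLoopB euler primes i := by
  induction n with
  | zero =>
    intro i primes hn hi hinv
    rw [rsaLoopA, rsaLoopB]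
    have : ¬ i < euler := by omega
    simp [this]
  | succ n ih =>
    intro i primes hn hi hinv
    rw [rsaLoopA, rsaLoopB]
    by_cases hlt : i < euler
    · simp only [hlt, if_true]
      have hiff := (isPrimeA_iff i hi).trans (testB_iff i primes hi hinv).symm
      by_cases hp : isPrimeA i = true
      · rw [if_pos hp, if_pos (hiff.mp hp)]
        have hprime := (isPrimeA_iff i hi).mp hp
        rw [gcd_eq_mod euler i hi hprime]
        by_cases hm : (PySem.Int.mod euler i != 0) = true
        · rw [if_pos hm, if_pos hm]
        · rw [if_neg hm, if_neg hm]
          apply ih _ _ (by omega) (by omega)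
          intro p
          simp only [List.mem_append, List.mem_singleton, hinv]
          constructor
          · rintro (⟨h1, h2, h3⟩ | rfl)
            · exact ⟨h1, by omega, h3⟩
            · exact ⟨hi, by omega, hprime⟩
          · rintro ⟨h1, h2, h3⟩
            by_cases hpi : p = i
            · right; exact hpi
            · left; exact ⟨h1, by omega, h3⟩
      · rw [if_neg hp, if_neg (fun hc => hp (hiff.mpr hc))]
        apply ih _ _ (by omega) (by omega)
        intro p
        rw [hinv]
        have hnpr : ¬ Nat.Prime i.toNat := fun hc => hp ((isPrimeA_iff i hi).mpr hc)
        constructor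
        · rintro ⟨h1, h2, h3⟩; exact ⟨h1, by omega, h3⟩
        · rintro ⟨h1, h2, h3⟩
          refine ⟨h1, ?_, h3⟩
          by_cases hpi : p = i
          · exact absurd (hpi ▸ h3) hnpr
          · omega
    · simp [hlt]

-- ===== VERDICT (by name: the statement is the Claim_ definition above) =====
theorem rsa_get_open_key_spec : Claim_equal_rsa_get_open_key := by
  intro euler _
  unfold Spec_rsa_get_open_key rsa_get_open_key rsa_get_open_key_alt
  exact loop_eq (euler - 2).toNat euler 2 [] le_rfl (by norm_num)
    (by intro p; simp; omega)
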